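-- pv_equiv track=rewrite | github.com/Ja34ek/Algorytmy-zaawansowane | Studnie.py | update_R_D
-- ===== SOURCE A (Python) =====
-- def delete(L,x):
--     """
--     Funkcja pomocnicza
--     """
--     for i in range(len(L)):
--         if L[i]==x:
--             return L[:i]+L[i+1:]
--     return L
--
-- def update_R_D(R_D,M):
--     """
--     Uaktualnienie zbioru R_D
--     """
--     RD=R_D.copy()
--     for pary in M:
--         if pary[1] in RD:
--             RD=delete(RD,pary[1])
--     if RD==None:
--         return []
--     return RD
-- ===== SOURCE B (Python) =====
-- def update_R_D(R_D, M):
--     """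
--     Uaktualnienie zbioru R_D
--     """
--     cnt = {}
--     for pary in M:
--         cnt[pary[1]] = cnt.get(pary[1], 0) + 1
--     out = []
--     for v in R_D:
--         if cnt.get(v, 0) > 0:
--             cnt[v] = cnt.get(v, 0) - 1
--         else:
--             out.append(v)
--     return out
-- ===== Notes on version B (the rewrite author's own statement) =====
-- stated objective: faster
-- what changed: Instead of scanning RD for each pair of M and rebuilding the list by slicing, B counts the multiplicities of M's second elements in a dict once and filters R_D in a single pass, skipping (decrementing) counted values, which removes the same first occurrences in the same order.
import Mathlib
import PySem

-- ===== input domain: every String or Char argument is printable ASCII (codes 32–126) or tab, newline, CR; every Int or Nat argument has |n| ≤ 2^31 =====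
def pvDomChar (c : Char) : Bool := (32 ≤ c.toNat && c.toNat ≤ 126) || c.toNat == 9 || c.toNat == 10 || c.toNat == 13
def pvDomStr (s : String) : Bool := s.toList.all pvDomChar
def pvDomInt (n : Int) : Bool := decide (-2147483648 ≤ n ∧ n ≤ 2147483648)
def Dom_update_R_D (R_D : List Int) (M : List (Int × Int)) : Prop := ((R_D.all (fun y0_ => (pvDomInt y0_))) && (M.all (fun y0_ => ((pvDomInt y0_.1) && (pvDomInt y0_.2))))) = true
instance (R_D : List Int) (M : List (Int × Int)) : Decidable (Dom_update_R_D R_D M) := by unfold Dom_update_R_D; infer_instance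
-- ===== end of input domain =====

-- B replaces A's per-pair linear scan of RD by a counting dict built once plus a single
-- filtering pass over R_D (objective: faster, asymptotic).

-- ===== PORT A =====
-- helper `delete`: scan for the first element equal to x, drop it (L[:i]+L[i+1:])
def pyDelete (L : List Int) (x : Int) : List Int :=
  match L with
  | [] => L
  | a :: t => if a == x then t else a :: pyDelete t x

def update_R_D (R_D : List Int) (M : List (Int × Int)) : List Int :=
  let RD := M.foldl (fun rd pary => if rd.contains pary.2 then pyDelete rd pary.2 else rd) R_D
  -- Python's `if RD == None: return []` branch is dead: RD is always a list
  RD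

-- ===== PORT B =====
-- second loop of Source B: filter R_D, consuming one count per skipped element
def altLoop (cnt : PySem.Dict Int Int) : List Int → List Int
  | [] => []
  | v :: t =>
    if 0 < cnt.getD v 0 then altLoop (cnt.insert v (cnt.getD v 0 - 1)) t
    else v :: altLoop cnt t

def update_R_D_alt (R_D : List Int) (M : List (Int × Int)) : List Int :=
  let cnt := M.foldl (fun c pary => c.insert pary.2 (c.getD pary.2 0 + 1)) PySem.Dict.empty
  altLoop cnt R_D

-- ===== PRECONDITION & SPEC =====
def Spec_update_R_D (R_D : List Int) (M : List (Int × Int)) (out : List Int) : Prop := out = update_R_D_alt R_D M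
instance (R_D : List Int) (M : List (Int × Int)) (out : List Int) : Decidable (Spec_update_R_D R_D M out) := by unfold Spec_update_R_D; infer_instance

-- ===== CLAIM (what is proved, stated in full; the proofs are below) =====
def Claim_equal_update_R_D : Prop := ∀ (R_D : List Int) (M : List (Int × Int)), Dom_update_R_D R_D M → Spec_update_R_D R_D M (update_R_D R_D M)

-- ===== LEMMAS AND PROOFS =====

-- abstract counted filter over a count function (proof-side model of altLoop)
def cmFilter (c : Int → Int) : List Int → List Int
  | [] => []
  | v :: t =>
    if 0 < c v then cmFilter (fun w => if w = v then c v - 1 else c w) t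
    else v :: cmFilter c t

theorem pyDelete_eq_erase (L : List Int) (x : Int) : pyDelete L x = L.erase x := by
  induction L with
  | nil => rfl
  | cons a t ih => simp [pyDelete, List.erase_cons, ih]

theorem stepA_eq (rd : List Int) (x : Int) :
    (if rd.contains x then pyDelete rd x else rd) = rd.erase x := by
  by_cases h : x ∈ rd
  · rw [if_pos (by simpa using h), pyDelete_eq_erase]
  · rw [if_neg (by simpa using h), List.erase_of_not_mem h]

theorem foldA_eq (M : List (Int × Int)) (rd : List Int) :
    M.foldl (fun rd pary => if rd.contains pary.2 then pyDelete rd pary.2 else rd) rd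
      = M.foldl (fun rd p => rd.erase p.2) rd := by
  induction M generalizing rd with
  | nil => rfl
  | cons p M _ => simp only [List.foldl_cons, stepA_eq]

theorem foldl_erase_comm (M : List (Int × Int)) (rd : List Int) (x : Int) :
    M.foldl (fun rd p => rd.erase p.2) (rd.erase x)
      = (M.foldl (fun rd p => rd.erase p.2) rd).erase x := by
  induction M generalizing rd with
  | nil => rfl
  | cons p M ih =>
    simp only [List.foldl_cons]
    rw [List.erase_comm, ih]

theorem cmFilter_zero (l : List Int) : cmFilter (fun _ => 0) l = l := by
  induction l with
  | nil => rfl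
  | cons v t ih => simp [cmFilter, ih]

theorem cmFilter_congr {c c' : Int → Int} (h : ∀ v, c v = c' v) (l : List Int) :
    cmFilter c l = cmFilter c' l := by
  have : c = c' := funext h
  rw [this]

-- bumping the count of x by one is the same as erasing the first x before filtering
theorem cmFilter_bump (rd : List Int) (c : Int → Int) (x : Int) (hc : ∀ v, 0 ≤ c v) :
    cmFilter (fun w => if w = x then c x + 1 else c w) rd = cmFilter c (rd.erase x) := by
  induction rd generalizing c with
  | nil => rfl
  | cons a t ih =>
    by_cases hax : a = x
    · subst hax
      have hpos : 0 < c a + 1 := by have := hc a; omega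
      rw [List.erase_cons_head]
      simp only [cmFilter]
      rw [if_pos (by simpa using hpos)]
      apply cmFilter_congr
      intro v
      by_cases hv : v = a
      · rw [hv]; simp
      · simp [hv]
    · have herase : (a :: t).erase x = a :: t.erase x := by
        rw [List.erase_cons_tail]
        simp [hax]
      rw [herase]
      have h1 : (if a = x then c x + 1 else c a) = c a := by simp [hax]
      by_cases hpos : 0 < c a
      · simp only [cmFilter, h1, if_pos hpos]
        have hstep :
            (fun w => if w = a then c a - 1 else if w = x then c x + 1 else c w)
              = (fun w => if w = x then (if x = a then c a - 1 else c x) + 1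
                          else (if w = a then c a - 1 else c w)) := by
          funext w
          have hxa : ¬ x = a := fun h => hax h.symm
          by_cases hw : w = a
          · rw [hw]; simp [hax]
          · by_cases hwx : w = x <;> simp [hw, hwx, hxa]
        rw [hstep]
        exact ih (fun w => if w = a then c a - 1 else c w)
          (fun v => by
            by_cases hv : v = a
            · simp only [hv, if_pos]; omega
            · simp only [if_neg hv]; exact hc v)
      · simp only [cmFilter, h1, if_neg hpos]
        rw [ih c hc]

-- main invariant: filtering with the counts of M's second elements equals A's fold of erases
theorem cmFilter_count (M : List (Int × Int)) (c : Int → Int) (rd : List Int)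
    (hc : ∀ v, 0 ≤ c v) :
    cmFilter (fun v => c v + ((M.map Prod.snd).count v : Int)) rd
      = cmFilter c (M.foldl (fun rd p => rd.erase p.2) rd) := by
  induction M generalizing c rd with
  | nil => simp only [List.foldl_nil, List.map_nil, List.count_nil]
           apply cmFilter_congr; intro v; simp
  | cons p M ih =>
    simp only [List.foldl_cons]
    have h1 : cmFilter (fun v => c v + (((p :: M).map Prod.snd).count v : Int)) rd
        = cmFilter (fun v => (fun w => if w = p.2 then c p.2 + 1 else c w) v
            + ((M.map Prod.snd).count v : Int)) rd := by
      apply cmFilter_congr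
      intro v
      by_cases hv : v = p.2
      · rw [hv]
        simp
        ring
      · have hne : ¬ p.2 = v := fun h => hv h.symm
        simp [hv, hne]
    rw [h1, ih]
    · rw [cmFilter_bump _ c p.2 hc, foldl_erase_comm]
    · intro v; by_cases hv : v = p.2
      · subst hv; simp; have := hc p.2; omega
      · simp [hv]; exact hc v

-- altLoop is cmFilter of the dict's count function
theorem altLoop_eq_cmFilter (l : List Int) (cnt : PySem.Dict Int Int) :
    altLoop cnt l = cmFilter (fun v => cnt.getD v 0) l := by
  induction l generalizing cnt with
  | nil => rfl
  | cons v t ih =>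
    by_cases h : 0 < cnt.getD v 0
    · simp only [altLoop, cmFilter, if_pos h, ih]
      apply cmFilter_congr
      intro w
      rw [PySem.Dict.getD_insert]
    · simp only [altLoop, cmFilter, if_neg h, ih]

-- ===== VERDICT (by name: the statement is the Claim_ definition above) =====
theorem update_R_D_spec : Claim_equal_update_R_D := by
  intro R_D M _
  show update_R_D R_D M = update_R_D_alt R_D M
  unfold update_R_D update_R_D_alt
  rw [foldA_eq, altLoop_eq_cmFilter]
  have hcnt : ∀ v, (M.foldl (fun c (pary : Int × Int) =>
      c.insert pary.2 (c.getD pary.2 0 + 1)) PySem.Dict.empty).getD v 0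
        = ((M.map Prod.snd).count v : Int) := by
    intro v
    have := PySem.Dict.getD_foldl_insert_add_one (l := M.map Prod.snd)
      (d := (PySem.Dict.empty : PySem.Dict Int Int)) (v := v)
    rw [List.foldl_map] at this
    simpa [PySem.Dict.getD_empty] using this
  rw [cmFilter_congr (c' := fun v => (fun _ => (0:Int)) v + ((M.map Prod.snd).count v : Int))
        (fun v => by simp [hcnt v]),
      cmFilter_count M (fun _ => 0) R_D (fun _ => le_refl 0), cmFilter_zero]
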